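-- pv_equiv track=rewrite | github.com/yamaton/CodeForces | problemSet/604C_Alternative_Thinking.py | solve
-- ===== SOURCE A (Python) =====
-- import itertools as it
--
-- def solve(s: str, n: int) -> int:
--     lens = [sum(1 for i in iterable) for (_, iterable) in it.groupby(s)]
--     maxlen = max(lens)
--     altlen = len(lens)
--     if maxlen == 1:
--         ans = altlen
--     elif maxlen >= 3:
--         ans = altlen + 2
--     elif lens.count(2) == 1:
--         ans = altlen + 1
--     else:
--         ans = altlen + 2
--     return ans
-- ===== SOURCE B (Python) =====
-- import itertools as it
--
-- def solve(s: str, n: int) -> int: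
--     groups = sum(1 for _ in it.groupby(s))
--     return min(groups + 2, len(s))
-- ===== Notes on version B (the rewrite author's own statement) =====
-- stated objective: simpler
-- what changed: B replaces A's per-run length list with its max/count(2) four-way case analysis by a single group count and the closed form min(groups + 2, len(s)), proved to reproduce all four branches.
import Mathlib
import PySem

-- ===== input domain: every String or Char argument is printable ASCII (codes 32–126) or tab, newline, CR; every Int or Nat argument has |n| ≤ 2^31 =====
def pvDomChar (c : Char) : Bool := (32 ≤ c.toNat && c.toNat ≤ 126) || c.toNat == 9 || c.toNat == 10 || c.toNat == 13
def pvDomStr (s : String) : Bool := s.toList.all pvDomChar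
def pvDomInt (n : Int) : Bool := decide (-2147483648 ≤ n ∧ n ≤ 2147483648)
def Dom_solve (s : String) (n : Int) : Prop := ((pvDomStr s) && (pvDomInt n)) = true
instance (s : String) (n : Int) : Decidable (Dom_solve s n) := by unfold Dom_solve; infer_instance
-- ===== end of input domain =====

-- B computes one group count and the closed form min(groups+2, len(s)) instead of
-- A's per-run length list with max/count case analysis; return-value equivalence on
-- non-empty strings (A raises ValueError on "" via max([])).

-- ===== PORT A =====
-- group lengths of it.groupby: current char c, current run length k
def groupLensGo (c : Char) (k : Int) : List Char → List Int
  | [] => [k]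
  | x :: xs => if x = c then groupLensGo c (k + 1) xs else k :: groupLensGo x 1 xs

def groupLens : List Char → List Int
  | [] => []
  | x :: xs => groupLensGo x 1 xs

def solve (s : String) (n : Int) : Int :=
  let lens := groupLens s.toList
  -- max(lens): raises on []; Pre_solve excludes that, so the default is never read
  let maxlen := (PySem.List.max? lens (fun x => x)).getD 0
  let altlen : Int := lens.length
  if maxlen = 1 then altlen
  else if 3 ≤ maxlen then altlen + 2
  else if PySem.List.count lens 2 = 1 then altlen + 1
  else altlen + 2

-- ===== PORT B =====
-- sum(1 for _ in it.groupby(s)): count the maximal runs in one pass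
def runCountGo (c : Char) : List Char → Int
  | [] => 1
  | x :: xs => (if x = c then 0 else 1) + runCountGo x xs

def runCount : List Char → Int
  | [] => 0
  | x :: xs => runCountGo x xs

def solve_alt (s : String) (n : Int) : Int :=
  min (runCount s.toList + 2) (PySem.Str.len s)

-- ===== PRECONDITION & SPEC =====
-- Pre_ excludes only the empty string, on which A's max([]) raises ValueError.
def Pre_solve (s : String) (n : Int) : Prop := s.toList ≠ []
instance (s : String) (n : Int) : Decidable (Pre_solve s n) := by unfold Pre_solve; infer_instance
def pvWitness_solve : String × Int := ("aab", 3)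

def Spec_solve (s : String) (n : Int) (out : Int) : Prop := out = solve_alt s n
instance (s : String) (n : Int) (out : Int) : Decidable (Spec_solve s n out) := by unfold Spec_solve; infer_instance

-- ===== CLAIM (what is proved, stated in full; the proofs are below) =====
def Claim_equal_solve : Prop := ∀ (s : String) (n : Int), Dom_solve s n → Pre_solve s n → Spec_solve s n (solve s n)

-- ===== LEMMAS AND PROOFS =====

-- every group length produced is ≥ 1
theorem groupLensGo_pos (xs : List Char) : ∀ (c : Char) (k : Int), 1 ≤ k →
    ∀ x ∈ groupLensGo c k xs, 1 ≤ x := by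
  induction xs with
  | nil =>
    intro c k hk x hx
    simp only [groupLensGo, List.mem_singleton] at hx
    omega
  | cons y ys ih =>
    intro c k hk x hx
    simp only [groupLensGo] at hx
    split at hx
    · exact ih c (k + 1) (by omega) x hx
    · rcases List.mem_cons.mp hx with rfl | hx
      · omega
      · exact ih y 1 le_rfl x hx

-- B's run count is the length of A's group-length list
theorem runCountGo_eq_length (xs : List Char) : ∀ (c : Char) (k : Int),
    runCountGo c xs = ((groupLensGo c k xs).length : Int) := by
  induction xs with
  | nil => intro c k; simp [runCountGo, groupLensGo]
  | cons y ys ih =>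
    intro c k
    simp only [runCountGo, groupLensGo]
    split
    · rename_i h; subst h
      simpa using ih y (k + 1)
    · rw [ih y 1]
      simp only [List.length_cons]
      push_cast
      ring

-- the group lengths sum to the string length (plus the carried-in run length)
theorem groupLensGo_sum (xs : List Char) : ∀ (c : Char) (k : Int),
    (groupLensGo c k xs).sum = k + (xs.length : Int) := by
  induction xs with
  | nil => intro c k; simp [groupLensGo]
  | cons y ys ih =>
    intro c k
    simp only [groupLensGo]
    split
    · rw [ih]
      simp only [List.length_cons]
      push_cast
      ring
    · rw [List.sum_cons, ih y 1]
      simp only [List.length_cons]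
      push_cast
      ring

theorem length_le_sum (l : List Int) (h1 : ∀ x ∈ l, 1 ≤ x) :
    (l.length : Int) ≤ l.sum := by
  induction l with
  | nil => simp
  | cons x t ih =>
    have hx := h1 x (by simp)
    have := ih (fun y hy => h1 y (by simp [hy]))
    simp only [List.sum_cons, List.length_cons]
    push_cast; omega

theorem sum_eq_length_of_all_one (l : List Int) (h1 : ∀ x ∈ l, 1 ≤ x)
    (h2 : ∀ x ∈ l, x ≤ 1) : l.sum = (l.length : Int) := by
  induction l with
  | nil => simp
  | cons x t ih =>
    have hx1 := h1 x (by simp); have hx2 := h2 x (by simp)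
    have := ih (fun y hy => h1 y (by simp [hy])) (fun y hy => h2 y (by simp [hy]))
    simp only [List.sum_cons, List.length_cons]
    push_cast; omega

theorem sum_ge_of_big_mem (l : List Int) (m : Int) (hm : m ∈ l) (h3 : 3 ≤ m)
    (h1 : ∀ x ∈ l, 1 ≤ x) : (l.length : Int) + 2 ≤ l.sum := by
  induction l with
  | nil => simp at hm
  | cons x t ih =>
    have ht := length_le_sum t (fun y hy => h1 y (by simp [hy]))
    simp only [List.sum_cons, List.length_cons]
    rcases List.mem_cons.mp hm with rfl | hm'
    · push_cast; omega
    · have hx := h1 x (by simp)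
      have := ih hm' (fun y hy => h1 y (by simp [hy]))
      push_cast; omega

theorem sum_eq_length_add_count_two (l : List Int) (h1 : ∀ x ∈ l, 1 ≤ x)
    (h2 : ∀ x ∈ l, x ≤ 2) : l.sum = (l.length : Int) + (List.count 2 l : Int) := by
  induction l with
  | nil => simp
  | cons x t ih =>
    have hx1 := h1 x (by simp); have hx2 := h2 x (by simp)
    have := ih (fun y hy => h1 y (by simp [hy])) (fun y hy => h2 y (by simp [hy]))
    by_cases hx : x = 2
    · subst hx; simp only [List.sum_cons, List.length_cons, List.count_cons_self]
      push_cast; omega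
    · have hxe : x = 1 := by omega
      subst hxe
      rw [List.count_cons_of_ne (by norm_num)]
      simp only [List.sum_cons, List.length_cons]
      push_cast; omega

theorem one_le_count_of_mem (l : List Int) (h : (2 : Int) ∈ l) : 1 ≤ List.count 2 l :=
  List.count_pos_iff.mpr h

-- A's four-way branch equals min(|l| + 2, sum l) for any non-empty list of positives
theorem branch_eq_min (l : List Int) (hne : l ≠ []) (h1 : ∀ x ∈ l, 1 ≤ x) :
    (let maxlen := (PySem.List.max? l (fun x => x)).getD 0
     if maxlen = 1 then (l.length : Int)
     else if 3 ≤ maxlen then (l.length : Int) + 2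
     else if PySem.List.count l 2 = 1 then (l.length : Int) + 1
     else (l.length : Int) + 2)
    = min ((l.length : Int) + 2) l.sum := by
  obtain ⟨m, hm⟩ : ∃ m, PySem.List.max? l (fun x => x) = some m := by
    cases hmax : PySem.List.max? l (fun x => x) with
    | none => exact absurd ((PySem.List.max?_eq_none_iff l _).mp hmax) hne
    | some m => exact ⟨m, rfl⟩
  have hmem := PySem.List.max?_mem hm
  have hmax : ∀ y ∈ l, y ≤ m := PySem.List.max?_isMax hm
  have hm1 : 1 ≤ m := h1 m hmem
  simp only [hm, Option.getD_some, PySem.List.count_eq]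
  by_cases hcase1 : m = 1
  · subst hcase1
    rw [if_pos rfl, sum_eq_length_of_all_one l h1 hmax]
    omega
  · rw [if_neg hcase1]
    by_cases hcase3 : 3 ≤ m
    · rw [if_pos hcase3]
      have := sum_ge_of_big_mem l m hmem hcase3 h1
      omega
    · rw [if_neg hcase3]
      have hm2 : m = 2 := by omega
      subst hm2
      have hsum := sum_eq_length_add_count_two l h1 hmax
      have hcnt := one_le_count_of_mem l hmem
      by_cases hc : List.count 2 l = 1
      · rw [if_pos hc]; omega
      · rw [if_neg hc]; omega

theorem groupLensGo_ne_nil (xs : List Char) : ∀ (c : Char) (k : Int), groupLensGo c k xs ≠ [] := by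
  induction xs with
  | nil => intro c k; simp [groupLensGo]
  | cons y ys ih =>
    intro c k
    simp only [groupLensGo]
    split
    · exact ih c (k + 1)
    · simp

theorem solve_eq (s : String) (n : Int) (hne : s.toList ≠ []) : solve s n = solve_alt s n := by
  unfold solve solve_alt
  rw [PySem.Str.len_eq]
  obtain ⟨x, xs, hs⟩ : ∃ x xs, s.toList = x :: xs := by
    cases h : s.toList with
    | nil => exact absurd h hne
    | cons a b => exact ⟨a, b, rfl⟩
  rw [hs]
  simp only [groupLens, runCount]
  rw [runCountGo_eq_length xs x 1]
  have hb := branch_eq_min (groupLensGo x 1 xs) (groupLensGo_ne_nil xs x 1)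
    (groupLensGo_pos xs x 1 le_rfl)
  simp only at hb
  rw [hb, groupLensGo_sum]
  simp only [List.length_cons]
  push_cast
  omega

-- ===== VERDICT (by name: the statement is the Claim_ definition above) =====
theorem solve_spec : Claim_equal_solve := by
  intro s n _ hp
  show solve s n = solve_alt s n
  exact solve_eq s n hp
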